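-- pv_equiv track=rewrite | github.com/Tushar-2021/Analysts | data_analysis.py | calculate_student_level
-- ===== SOURCE A (Python) =====
-- def calculate_student_level(percentage_correct):
--     student_levels = []
--     for percentage in percentage_correct:
--         if percentage >= 90:
--             level = "Excellent"
--         elif percentage >= 70:
--             level = "Good"
--         elif percentage >= 50:
--             level = "Average"
--         else:
--             level = "Poor"
--         student_levels.append(level)
--     return student_levels
-- ===== SOURCE B (Python) =====
-- import bisect
--
-- _THRESHOLDS = [50, 70, 90]
-- _LABELS = ["Poor", "Average", "Good", "Excellent"]
--
-- def calculate_student_level(percentage_correct):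
--     return [_LABELS[bisect.bisect(_THRESHOLDS, p)] for p in percentage_correct]
-- ===== Notes on version B (the rewrite author's own statement) =====
-- stated objective: idiomatic
-- what changed: Replaces the four-branch if/elif comparison chain with a precomputed threshold table consulted by bisect and a label lookup.
import Mathlib
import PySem

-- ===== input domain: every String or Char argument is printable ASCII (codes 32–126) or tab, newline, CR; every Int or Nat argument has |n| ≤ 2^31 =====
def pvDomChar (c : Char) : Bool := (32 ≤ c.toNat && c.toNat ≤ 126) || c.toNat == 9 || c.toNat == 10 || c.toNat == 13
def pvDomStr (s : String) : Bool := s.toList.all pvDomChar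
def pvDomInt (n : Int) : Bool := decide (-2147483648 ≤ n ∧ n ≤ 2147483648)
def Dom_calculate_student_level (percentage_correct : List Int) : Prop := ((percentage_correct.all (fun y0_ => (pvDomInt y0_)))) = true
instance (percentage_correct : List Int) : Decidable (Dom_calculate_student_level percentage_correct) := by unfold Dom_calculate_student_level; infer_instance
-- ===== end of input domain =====

-- B replaces A's if/elif comparison chain with a threshold table consulted by bisection and a label lookup (idiomatic rewrite).


-- ===== PORT A =====
def calculate_student_level (percentage_correct : List Int) : List String :=
  percentage_correct.foldl
    (fun student_levels percentage =>
      let level :=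
        if percentage ≥ 90 then "Excellent"
        else if percentage ≥ 70 then "Good"
        else if percentage ≥ 50 then "Average"
        else "Poor"
      student_levels ++ [level])
    []

-- ===== PORT B =====
-- bisect.bisect on the sorted 3-element table = number of thresholds ≤ p (library call ported by its Lean counterpart)
def pvThresholds : List Int := [50, 70, 90]
def pvLabels : List String := ["Poor", "Average", "Good", "Excellent"]

def calculate_student_level_alt (percentage_correct : List Int) : List String :=
  percentage_correct.map (fun p => pvLabels.getD (pvThresholds.countP (fun t => decide (t ≤ p))) "")

-- ===== PRECONDITION & SPEC =====
def Spec_calculate_student_level (percentage_correct : List Int) (out : List String) : Prop := out = calculate_student_level_alt percentage_correct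
instance (percentage_correct : List Int) (out : List String) : Decidable (Spec_calculate_student_level percentage_correct out) := by unfold Spec_calculate_student_level; infer_instance

-- ===== CLAIM (what is proved, stated in full; the proofs are below) =====
def Claim_equal_calculate_student_level : Prop := ∀ (percentage_correct : List Int), Dom_calculate_student_level percentage_correct → Spec_calculate_student_level percentage_correct (calculate_student_level percentage_correct)

-- ===== LEMMAS AND PROOFS =====
theorem pv_elem_eq (p : Int) :
    (if p ≥ 90 then "Excellent"
     else if p ≥ 70 then "Good"
     else if p ≥ 50 then "Average"
     else "Poor")
    = pvLabels.getD (pvThresholds.countP (fun t => decide (t ≤ p))) "" := by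
  split_ifs with h90 h70 h50
  · have h70 : (70:Int) ≤ p := by omega
    have h50 : (50:Int) ≤ p := by omega
    simp [pvLabels, pvThresholds, List.countP, List.countP.go, h90, h70, h50]
  · have h50 : (50:Int) ≤ p := by omega
    simp [pvLabels, pvThresholds, List.countP, List.countP.go, h70, h50, show ¬(90:Int) ≤ p from h90]
  · simp [pvLabels, pvThresholds, List.countP, List.countP.go, h50,
      show ¬(90:Int) ≤ p from h90, show ¬(70:Int) ≤ p from h70]
  · simp [pvLabels, pvThresholds, List.countP, List.countP.go,
      show ¬(90:Int) ≤ p from h90, show ¬(70:Int) ≤ p from h70, show ¬(50:Int) ≤ p from h50]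

theorem pv_foldl_map (xs : List Int) (acc : List String) :
    xs.foldl
      (fun student_levels percentage =>
        let level :=
          if percentage ≥ 90 then "Excellent"
          else if percentage ≥ 70 then "Good"
          else if percentage ≥ 50 then "Average"
          else "Poor"
        student_levels ++ [level])
      acc
    = acc ++ xs.map (fun p => pvLabels.getD (pvThresholds.countP (fun t => decide (t ≤ p))) "") := by
  induction xs generalizing acc with
  | nil => simp
  | cons x xs ih => simp [ih, pv_elem_eq x]

-- ===== VERDICT (by name: the statement is the Claim_ definition above) =====
theorem calculate_student_level_spec : Claim_equal_calculate_student_level := by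
  intro xs _
  unfold Spec_calculate_student_level calculate_student_level calculate_student_level_alt
  simpa using pv_foldl_map xs []
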